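-- pv_equiv track=rewrite | github.com/ejharv/BonsAI | root_manager/writer.py | _split_at_table
-- ===== SOURCE A (Python) =====
-- def _split_at_table(
--     content: str,
--     section_marker: str,
-- ) -> tuple[list[str], list[str], list[str]]:
--     """
--     Find the markdown table under section_marker.
--     Returns (pre, table_lines, post).
--
--     pre  — every line up to and including the
--            section header, plus any non-| lines
--            between the header and the table
--     table_lines — the consecutive | lines that
--                   form the table
--     post — everything after the table
--     """
--     lines = content.splitlines()
--     phase = "before"  # before | in_section | in_table | after
--     pre: list[str] = []
--     table: list[str] = []
--     post: list[str] = []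
--
--     for line in lines:
--         if phase == "before":
--             pre.append(line)
--             if section_marker in line:
--                 phase = "in_section"
--         elif phase == "in_section":
--             if line.strip().startswith("|"):
--                 phase = "in_table"
--                 table.append(line)
--             else:
--                 pre.append(line)
--         elif phase == "in_table":
--             if line.strip().startswith("|"):
--                 table.append(line)
--             else:
--                 phase = "after"
--                 post.append(line)
--         else:  # after
--             post.append(line)
--
--     return pre, table, post
-- ===== SOURCE B (Python) =====
-- def _split_at_table(
--     content: str,
--     section_marker: str,
-- ) -> tuple[list[str], list[str], list[str]]:
--     lines = content.splitlines()
--     h = next((i for i, line in enumerate(lines) if section_marker in line), None)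
--     if h is None:
--         return lines, [], []
--     k = next((i for i, line in enumerate(lines[h + 1:]) if line.strip().startswith("|")), None)
--     if k is None:
--         return lines, [], []
--     t = h + 1 + k
--     rest = lines[t:]
--     table = []
--     for line in rest:
--         if not line.strip().startswith("|"):
--             break
--         table.append(line)
--     return lines[:t], table, rest[len(table):]
-- ===== Notes on version B (the rewrite author's own statement) =====
-- stated objective: alternative
-- what changed: Replaced A's four-phase state machine over all lines with a direct decomposition: find the header line index, find the first '|' line after it, take the consecutive run of '|' lines, and slice the line list into pre/table/post.
import Mathlib
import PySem

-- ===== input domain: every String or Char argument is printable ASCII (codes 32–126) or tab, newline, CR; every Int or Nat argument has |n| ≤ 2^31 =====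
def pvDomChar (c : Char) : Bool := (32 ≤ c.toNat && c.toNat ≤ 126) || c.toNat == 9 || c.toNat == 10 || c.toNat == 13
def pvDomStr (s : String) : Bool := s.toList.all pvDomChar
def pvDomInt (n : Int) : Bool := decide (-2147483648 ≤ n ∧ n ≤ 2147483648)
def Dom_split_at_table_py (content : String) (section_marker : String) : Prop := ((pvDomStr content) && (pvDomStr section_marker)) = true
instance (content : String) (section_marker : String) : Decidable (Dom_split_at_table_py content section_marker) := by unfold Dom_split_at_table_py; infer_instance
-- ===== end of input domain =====

-- B replaces A's four-phase state machine with a direct decomposition: find the header line,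
-- find the first '|' line after it, take the run of '|' lines, and slice (objective: alternative).


-- shared helpers: the two tests both Pythons perform on a line
def pvHasMarker (marker line : String) : Bool := PySem.Str.isIn marker line
def pvIsPipe (line : String) : Bool := PySem.Str.startswith (PySem.Str.strip line) "|"

-- ===== PORT A =====
-- one step of A's for-loop over the state (phase, pre, table, post)
def pvStepA (marker : String) (st : String × List String × List String × List String)
    (line : String) : String × List String × List String × List String :=
  match st with
  | (phase, pre, table, post) =>
    if phase = "before" then
      let pre := pre ++ [line]
      if pvHasMarker marker line then ("in_section", pre, table, post) else ("before", pre, table, post)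
    else if phase = "in_section" then
      if pvIsPipe line then ("in_table", pre, table ++ [line], post)
      else ("in_section", pre ++ [line], table, post)
    else if phase = "in_table" then
      if pvIsPipe line then ("in_table", pre, table ++ [line], post)
      else ("after", pre, table, post ++ [line])
    else ("after", pre, table, post ++ [line])

def split_at_table_py (content : String) (section_marker : String) :
    List String × List String × List String :=
  let lines := PySem.Str.splitlines content
  let st := lines.foldl (pvStepA section_marker) ("before", [], [], [])
  (st.2.1, st.2.2.1, st.2.2.2)

-- ===== PORT B =====
def split_at_table_py_alt (content : String) (section_marker : String) :
    List String × List String × List String :=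
  let lines := PySem.Str.splitlines content
  match lines.findIdx? (fun line => pvHasMarker section_marker line) with
  | none => (lines, [], [])
  | some h =>
    match (lines.drop (h + 1)).findIdx? pvIsPipe with
    | none => (lines, [], [])
    | some k =>
      let t := h + 1 + k
      let rest := lines.drop t
      -- the for-with-break collecting the leading '|' lines is a takeWhile
      let table := rest.takeWhile pvIsPipe
      (lines.take t, table, rest.drop table.length)

-- ===== PRECONDITION & SPEC =====
def Spec_split_at_table_py (content : String) (section_marker : String) (out : List String × List String × List String) : Prop := out = split_at_table_py_alt content section_marker
instance (content : String) (section_marker : String) (out : List String × List String × List String) : Decidable (Spec_split_at_table_py content section_marker out) := by unfold Spec_split_at_table_py; infer_instance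

-- ===== CLAIM (what is proved, stated in full; the proofs are below) =====
def Claim_equal_split_at_table_py : Prop := ∀ (content : String) (section_marker : String), Dom_split_at_table_py content section_marker → Spec_split_at_table_py content section_marker (split_at_table_py content section_marker)

-- ===== LEMMAS AND PROOFS =====

-- project the machine state to the returned triple
def pvProj (st : String × List String × List String × List String) :
    List String × List String × List String := (st.2.1, st.2.2.1, st.2.2.2)

-- B's list-level result, phrased with dropWhile
def pvBSpec (m : String) (ls : List String) : List String × List String × List String :=
  match ls.findIdx? (fun line => pvHasMarker m line) with
  | none => (ls, [], [])
  | some h =>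
    match (ls.drop (h + 1)).findIdx? pvIsPipe with
    | none => (ls, [], [])
    | some k =>
      ((ls.take (h + 1 + k)), (ls.drop (h + 1 + k)).takeWhile pvIsPipe,
        (ls.drop (h + 1 + k)).dropWhile pvIsPipe)

theorem pv_drop_len_takeWhile {α : Type} (p : α → Bool) :
    ∀ (l : List α), l.drop (l.takeWhile p).length = l.dropWhile p := by
  intro l
  induction l with
  | nil => rfl
  | cons a l ih =>
    by_cases h : p a = true
    · simp [List.takeWhile_cons, List.dropWhile_cons, h, ih]
    · simp [List.takeWhile_cons, List.dropWhile_cons, h]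

theorem pv_after (m : String) :
    ∀ (ls pre table post : List String),
      pvProj (ls.foldl (pvStepA m) ("after", pre, table, post)) = (pre, table, post ++ ls) := by
  intro ls
  induction ls with
  | nil => intro pre table post; simp [pvProj]
  | cons l ls ih =>
    intro pre table post
    simp only [List.foldl_cons, pvStepA]
    simp only [String.reduceEq, reduceIte]
    rw [ih]
    simp

theorem pv_table (m : String) :
    ∀ (ls pre table post : List String),
      pvProj (ls.foldl (pvStepA m) ("in_table", pre, table, post)) =
        (pre, table ++ ls.takeWhile pvIsPipe, post ++ ls.dropWhile pvIsPipe) := by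
  intro ls
  induction ls with
  | nil => intro pre table post; simp [pvProj]
  | cons l ls ih =>
    intro pre table post
    simp only [List.foldl_cons, pvStepA]
    simp only [String.reduceEq, reduceIte]
    by_cases h : pvIsPipe l = true
    · simp only [h, if_pos]
      rw [ih]
      simp [List.takeWhile_cons, List.dropWhile_cons, h]
    · simp only [h, if_neg, Bool.false_eq_true, not_false_iff, if_false]
      rw [pv_after]
      simp [List.takeWhile_cons, List.dropWhile_cons, h]

theorem pv_section (m : String) :
    ∀ (ls pre : List String),
      pvProj (ls.foldl (pvStepA m) ("in_section", pre, [], [])) =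
        (match ls.findIdx? pvIsPipe with
         | none => (pre ++ ls, [], [])
         | some k => (pre ++ ls.take k, (ls.drop k).takeWhile pvIsPipe,
             (ls.drop k).dropWhile pvIsPipe)) := by
  intro ls
  induction ls with
  | nil => intro pre; simp [pvProj]
  | cons l ls ih =>
    intro pre
    simp only [List.foldl_cons, pvStepA]
    simp only [String.reduceEq, reduceIte]
    by_cases h : pvIsPipe l = true
    · simp only [h, if_pos]
      rw [pv_table]
      simp [List.findIdx?_cons, h, List.takeWhile_cons, List.dropWhile_cons]
    · simp only [h, Bool.false_eq_true, not_false_iff, if_neg, if_false]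
      rw [ih]
      simp only [List.findIdx?_cons, h, Bool.false_eq_true, if_false]
      cases hf : ls.findIdx? pvIsPipe with
      | none => simp
      | some k => simp [List.take_succ_cons, List.drop_succ_cons]

theorem pv_before (m : String) :
    ∀ (ls pre : List String),
      pvProj (ls.foldl (pvStepA m) ("before", pre, [], [])) =
        (pre ++ (pvBSpec m ls).1, (pvBSpec m ls).2.1, (pvBSpec m ls).2.2) := by
  intro ls
  induction ls with
  | nil => intro pre; simp [pvProj, pvBSpec]
  | cons l ls ih =>
    intro pre
    simp only [List.foldl_cons, pvStepA]
    simp only [String.reduceEq, reduceIte]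
    by_cases h : pvHasMarker m l = true
    · simp only [h, if_pos]
      rw [pv_section]
      simp only [pvBSpec, List.findIdx?_cons, h, if_pos, List.drop_succ_cons, List.drop_zero]
      cases hf : ls.findIdx? pvIsPipe with
      | none => simp [hf]
      | some k => simp [hf, Nat.add_comm 1 k, List.take_succ_cons, List.drop_succ_cons]
    · simp only [h, Bool.false_eq_true, not_false_iff, if_neg, if_false]
      rw [ih]
      simp only [pvBSpec, List.findIdx?_cons, h, Bool.false_eq_true, if_false]
      cases hm : ls.findIdx? (fun line => pvHasMarker m line) with
      | none => simp
      | some hh =>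
        simp only [Option.map_some, List.drop_succ_cons]
        cases hf : (ls.drop (hh + 1)).findIdx? pvIsPipe with
        | none => simp
        | some k =>
          simp only []
          have h1 : hh + 1 + 1 + k = (hh + 1 + k) + 1 := by omega
          simp [h1, List.take_succ_cons, List.drop_succ_cons]

theorem pv_alt_eq_bspec (m : String) (ls : List String) :
    (match ls.findIdx? (fun line => pvHasMarker m line) with
      | none => (ls, ([] : List String), ([] : List String))
      | some h =>
        match (ls.drop (h + 1)).findIdx? pvIsPipe with
        | none => (ls, [], [])
        | some k =>
          ((ls.take (h + 1 + k)), (ls.drop (h + 1 + k)).takeWhile pvIsPipe,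
            (ls.drop (h + 1 + k)).drop ((ls.drop (h + 1 + k)).takeWhile pvIsPipe).length)) =
      pvBSpec m ls := by
  unfold pvBSpec
  cases hm : ls.findIdx? (fun line => pvHasMarker m line) with
  | none => rfl
  | some h =>
    cases hf : (ls.drop (h + 1)).findIdx? pvIsPipe with
    | none => simp [hf]
    | some k => simp only [hf, pv_drop_len_takeWhile]

-- ===== VERDICT (by name: the statement is the Claim_ definition above) =====
theorem split_at_table_py_spec : Claim_equal_split_at_table_py := by
  intro content section_marker _
  unfold Spec_split_at_table_py split_at_table_py split_at_table_py_alt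
  rw [pv_alt_eq_bspec]
  have h := pv_before section_marker (PySem.Str.splitlines content) []
  unfold pvProj at h
  simp only [List.nil_append] at h
  rw [h]
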